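-- pv_equiv track=rewrite | github.com/kpmerry/Advent-of-Code | 2024 Advent of Code/8/8.py | match_nodes
-- ===== SOURCE A (Python) =====
-- def match_nodes(nodes, grid):
--     """Creates a list of pairs of matching node types."""
--     nodes.sort(key=lambda x: x[2])
--
--     # Create list of unique node types.
--     node_dict = {}
--     for data in nodes:
--         if data[2] in node_dict:
--             (node_dict[data[2]]).append((data[0], data[1]))
--         else:
--             node_dict[data[2]] = [(data[0], data[1])]
--
--     # Find all the possible pairs of matching nodes.
--     pairs = []
--     for key in node_dict:
--         index = 1
--         for i in range(len(node_dict[key])):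
--             for j in range(index, len(node_dict[key])):
--                 pairs.append((node_dict[key][i], node_dict[key][j]))
--             index += 1
--
--     return pairs
-- ===== SOURCE B (Python) =====
-- def match_nodes(nodes, grid):
--     """Creates a list of pairs of matching node types."""
--     nodes.sort(key=lambda x: x[2])
--
--     # After the sort, nodes of the same type are contiguous: sweep once with
--     # two pointers to cut out each run, then pair the run front-to-back.
--     pairs = []
--     n = len(nodes)
--     i = 0
--     while i < n:
--         j = i + 1
--         while j < n and nodes[j][2] == nodes[i][2]:
--             j += 1
--         group = [(x, y) for x, y, _ in nodes[i:j]]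
--         while group:
--             first = group.pop(0)
--             pairs += [(first, other) for other in group]
--         i = j
--     return pairs
-- ===== Notes on version B (the rewrite author's own statement) =====
-- stated objective: alternative
-- what changed: Replaces the grouping dict and the dict-keyed triple index loop with a single two-pointer sweep over the sorted list that cuts out each contiguous same-type run and pairs it by popping the front, maintaining no dict or index table.
import Mathlib
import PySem

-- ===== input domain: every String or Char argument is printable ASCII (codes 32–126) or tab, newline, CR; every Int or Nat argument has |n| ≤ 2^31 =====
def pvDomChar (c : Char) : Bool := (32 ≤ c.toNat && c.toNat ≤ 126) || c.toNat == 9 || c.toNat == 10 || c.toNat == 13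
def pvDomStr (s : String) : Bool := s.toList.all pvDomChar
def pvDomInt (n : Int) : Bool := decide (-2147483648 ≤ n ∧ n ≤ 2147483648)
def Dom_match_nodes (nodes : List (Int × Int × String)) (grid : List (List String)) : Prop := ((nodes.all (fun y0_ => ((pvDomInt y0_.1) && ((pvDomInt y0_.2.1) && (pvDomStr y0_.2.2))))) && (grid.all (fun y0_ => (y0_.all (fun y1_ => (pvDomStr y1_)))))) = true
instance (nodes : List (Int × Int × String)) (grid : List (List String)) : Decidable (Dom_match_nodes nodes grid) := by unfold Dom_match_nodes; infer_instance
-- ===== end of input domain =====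

-- B replaces A's grouping dict and dict-keyed triple index loop by one two-pointer sweep over the
-- sorted list (same-type runs are contiguous after the sort) with front-pop pairing; same return value.
-- Both A and B sort `nodes` in place (the identical sort); the equivalence proved is about the return value.

-- ===== PORT A =====
-- the dict-building loop body: if data[2] in node_dict: append, else start a new list
def pvStepDict (d : PySem.Dict String (List (Int × Int))) (data : Int × Int × String) :
    PySem.Dict String (List (Int × Int)) :=
  if d.contains data.2.2 then d.insert data.2.2 (d.getD data.2.2 [] ++ [(data.1, data.2.1)])
  else d.insert data.2.2 [(data.1, data.2.1)]

def match_nodes (nodes : List (Int × Int × String)) (grid : List (List String)) :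
    List ((Int × Int) × (Int × Int)) :=
  let sortedNodes := PySem.List.sorted nodes (fun x => x.2.2) false
  let nodeDict := sortedNodes.foldl pvStepDict PySem.Dict.empty
  -- for key in node_dict: index = 1; for i in range(len(…)): for j in range(index, len(…)): append; index += 1
  nodeDict.keys.foldl (fun pairs key =>
    let g := nodeDict.getD key []
    ((PySem.List.pyRange 0 (PySem.List.len g) 1).foldl
      (fun (st : List ((Int × Int) × (Int × Int)) × Int) i =>
        ((PySem.List.pyRange st.2 (PySem.List.len g) 1).foldl
          (fun acc j => acc ++ [(PySem.List.pyGetD g i ((0 : Int), (0 : Int)),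
                                 PySem.List.pyGetD g j ((0 : Int), (0 : Int)))]) st.1,
         st.2 + 1))
      (pairs, 1)).1) []

-- ===== PORT B =====
-- while group: first = group.pop(0); pairs += [(first, other) for other in group]
def pvCombLoop (group : List (Int × Int)) (pairs : List ((Int × Int) × (Int × Int))) :
    List ((Int × Int) × (Int × Int)) :=
  match group with
  | [] => pairs
  | first :: rest => pvCombLoop rest (pairs ++ rest.map (fun other => (first, other)))

-- outer while: advance j over the run of nodes[i][2] (the takeWhile scan = the inner j-scan),
-- pair the projected run, continue at j (the dropWhile suffix)
def pvRunsLoop (nodes : List (Int × Int × String)) (pairs : List ((Int × Int) × (Int × Int))) :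
    List ((Int × Int) × (Int × Int)) :=
  match nodes with
  | [] => pairs
  | x :: xs =>
    pvRunsLoop (xs.dropWhile (fun y => y.2.2 == x.2.2))
      (pvCombLoop ((x :: xs.takeWhile (fun y => y.2.2 == x.2.2)).map (fun p => (p.1, p.2.1))) pairs)
termination_by nodes.length
decreasing_by
  simp only [List.length_cons]
  exact Nat.lt_succ_of_le (List.length_dropWhile_le _ _)

def match_nodes_alt (nodes : List (Int × Int × String)) (grid : List (List String)) :
    List ((Int × Int) × (Int × Int)) :=
  pvRunsLoop (PySem.List.sorted nodes (fun x => x.2.2) false) []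

-- ===== PRECONDITION & SPEC =====
def Spec_match_nodes (nodes : List (Int × Int × String)) (grid : List (List String)) (out : List ((Int × Int) × (Int × Int))) : Prop := out = match_nodes_alt nodes grid
instance (nodes : List (Int × Int × String)) (grid : List (List String)) (out : List ((Int × Int) × (Int × Int))) : Decidable (Spec_match_nodes nodes grid out) := by unfold Spec_match_nodes; infer_instance

-- ===== CLAIM (what is proved, stated in full; the proofs are below) =====
def Claim_equal_match_nodes : Prop := ∀ (nodes : List (Int × Int × String)) (grid : List (List String)), Dom_match_nodes nodes grid → Spec_match_nodes nodes grid (match_nodes nodes grid)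

-- ===== LEMMAS AND PROOFS =====

-- all ordered pairs (g[i], g[j]), i < j, in the common emission order of A and B
def pvComb2 (g : List (Int × Int)) : List ((Int × Int) × (Int × Int)) :=
  match g with
  | [] => []
  | x :: xs => xs.map (fun o => (x, o)) ++ pvComb2 xs

theorem pvCombLoop_eq (g : List (Int × Int)) (acc : List ((Int × Int) × (Int × Int))) :
    pvCombLoop g acc = acc ++ pvComb2 g := by
  induction g generalizing acc with
  | nil => simp [pvCombLoop, pvComb2]
  | cons x xs ih => simp [pvCombLoop, pvComb2, ih]

-- the `index` counter of A's pair loop equals i + 1 at element i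
theorem pvCounterElim {α : Type} (f : α → Int → Int → α) (b : Int) :
    ∀ (n : Nat) (a : Int), (b - a).toNat = n → ∀ (acc : α),
      ((PySem.List.pyRange a b 1).foldl (fun st i => (f st.1 i st.2, st.2 + 1)) (acc, a + 1)).1
        = (PySem.List.pyRange a b 1).foldl (fun x i => f x i (i + 1)) acc := by
  intro n
  induction n with
  | zero =>
    intro a h acc
    rw [PySem.List.pyRange_one_eq_nil (by omega)]
    rfl
  | succ n ih =>
    intro a h acc
    rw [PySem.List.pyRange_one_cons (by omega)]
    simp only [List.foldl_cons]
    exact ih (a + 1) (by omega) (f acc a (a + 1))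

-- A's stateless nested index loop = pvComb2, with an explicit offset into the full list
theorem pvOuterLoop_eq (G : List (Int × Int)) (g : List (Int × Int)) :
    ∀ (s : Nat), G.drop s = g →
      ∀ acc, (PySem.List.pyRange (s : Int) (PySem.List.len G) 1).foldl
          (fun x i => (PySem.List.pyRange (i + 1) (PySem.List.len G) 1).foldl
            (fun acc j => acc ++ [(PySem.List.pyGetD G i ((0 : Int), (0 : Int)),
                                   PySem.List.pyGetD G j ((0 : Int), (0 : Int)))]) x) acc
        = acc ++ pvComb2 g := by
  induction g with
  | nil =>
    intro s h acc
    have hlen : G.length ≤ s := List.drop_eq_nil_iff.mp h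
    rw [PySem.List.pyRange_one_eq_nil (by simp [PySem.List.len_eq]; exact_mod_cast hlen)]
    simp [pvComb2]
  | cons x xs ih =>
    intro s h acc
    have hs : s < G.length := by
      by_contra hc
      rw [List.drop_eq_nil_iff.mpr (by omega)] at h
      exact List.cons_ne_nil x xs h.symm
    rw [PySem.List.pyRange_one_cons (by simp [PySem.List.len_eq]; exact_mod_cast hs)]
    simp only [List.foldl_cons]
    have hget : PySem.List.pyGetD G (s : Int) ((0 : Int), (0 : Int)) = x := by
      rw [PySem.List.pyGetD_natCast]
      have h2 : G[s]? = some x := by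
        have h3 : (List.drop s G)[0]? = G[s + 0]? := List.getElem?_drop
        rw [h] at h3
        simpa using h3.symm
      simp [List.getD_eq_getElem?_getD, h2]
    have hdrop' : G.drop (s + 1) = xs := by
      rw [← List.drop_drop, h]
      rfl
    have hinner : (PySem.List.pyRange ((s : Int) + 1) (PySem.List.len G) 1).foldl
        (fun acc j => acc ++ [(PySem.List.pyGetD G (s : Int) ((0 : Int), (0 : Int)),
                               PySem.List.pyGetD G j ((0 : Int), (0 : Int)))]) acc
        = acc ++ xs.map (fun o => (x, o)) := by
      rw [PySem.List.foldl_pyRange_pyGetD G ((0 : Int), (0 : Int))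
        (fun acc o => acc ++ [(PySem.List.pyGetD G (s : Int) ((0 : Int), (0 : Int)), o)]) acc
        (by omega)]
      rw [show ((s : Int) + 1).toNat = s + 1 by omega, hdrop', hget]
      exact PySem.List.foldl_append_singleton_eq_map _ _ _
    rw [hinner]
    have hrec := ih (s + 1) hdrop' (acc ++ xs.map (fun o => (x, o)))
    rw [Nat.cast_add, Nat.cast_one] at hrec
    rw [hrec]
    simp [pvComb2]

-- A's per-key loop body equals acc ++ pvComb2 g
theorem pvBodyA_eq (g : List (Int × Int)) (acc : List ((Int × Int) × (Int × Int))) :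
    ((PySem.List.pyRange 0 (PySem.List.len g) 1).foldl
      (fun (st : List ((Int × Int) × (Int × Int)) × Int) i =>
        ((PySem.List.pyRange st.2 (PySem.List.len g) 1).foldl
          (fun acc j => acc ++ [(PySem.List.pyGetD g i ((0 : Int), (0 : Int)),
                                 PySem.List.pyGetD g j ((0 : Int), (0 : Int)))]) st.1,
         st.2 + 1))
      (acc, 1)).1 = acc ++ pvComb2 g := by
  have h1 := pvCounterElim
    (fun x i idx => (PySem.List.pyRange idx (PySem.List.len g) 1).foldl
      (fun acc j => acc ++ [(PySem.List.pyGetD g i ((0 : Int), (0 : Int)),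
                             PySem.List.pyGetD g j ((0 : Int), (0 : Int)))]) x)
    (PySem.List.len g) (PySem.List.len g).toNat 0 (by simp) acc
  simp only [zero_add] at h1
  rw [h1]
  have h2 := pvOuterLoop_eq g g 0 (by simp) acc
  rwa [Nat.cast_zero] at h2

-- getD of an absent key is the default
theorem pvGetD_not_contains {κ ν : Type} [BEq κ] [LawfulBEq κ] (d : PySem.Dict κ ν) (k : κ) (d0 : ν)
    (h : d.contains k = false) : d.getD k d0 = d0 := by
  have := (PySem.Dict.get?_eq_none_iff_contains d k).mpr h
  simp [PySem.Dict.getD, this]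

-- one step of A's dict-building loop, seen through getD
theorem pvStep_getD (d : PySem.Dict String (List (Int × Int))) (x : Int × Int × String) (c : String) :
    (pvStepDict d x).getD c [] =
      d.getD c [] ++ (if x.2.2 == c then [(x.1, x.2.1)] else []) := by
  by_cases hk : x.2.2 = c
  · subst hk
    simp only [beq_self_eq_true, if_pos]
    unfold pvStepDict
    by_cases hc : d.contains x.2.2 = true
    · rw [if_pos hc, PySem.Dict.getD_insert_self]
    · rw [if_neg hc, PySem.Dict.getD_insert_self,
        pvGetD_not_contains d x.2.2 [] (by simpa using hc)]
      simp
  · rw [if_neg (by simpa using hk)]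
    unfold pvStepDict
    split <;> rw [PySem.Dict.getD_insert_of_ne _ _ _ (fun e => hk e.symm)] <;> simp

-- the dict built by A's loop: the value at key c is the filtered projection of the input
theorem pvBuild_getD (L : List (Int × Int × String)) :
    ∀ (d : PySem.Dict String (List (Int × Int))) (c : String),
      (L.foldl pvStepDict d).getD c []
        = d.getD c [] ++ (L.filter (fun x => x.2.2 == c)).map (fun p => (p.1, p.2.1)) := by
  induction L with
  | nil => intro d c; simp
  | cons x L ih =>
    intro d c
    simp only [List.foldl_cons]
    rw [ih (pvStepDict d x) c, pvStep_getD]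
    by_cases hk : x.2.2 = c
    · simp [hk]
    · simp [(by simpa using hk : (x.2.2 == c) = false)]

-- the dict built by A's loop: its keys are the input keys, deduplicated in first-occurrence order
theorem pvBuild_keys (L : List (Int × Int × String)) :
    (L.foldl pvStepDict PySem.Dict.empty).keys = PySem.Set.ofList (L.map (fun x => x.2.2)) := by
  have hstep : pvStepDict = fun d x => d.insert x.2.2
      (if d.contains x.2.2 then d.getD x.2.2 [] ++ [(x.1, x.2.1)] else [(x.1, x.2.1)]) := by
    funext d x
    unfold pvStepDict
    split <;> simp_all
  rw [hstep]
  rw [PySem.Dict.keys_foldl_insert_key L (fun x => x.2.2) _ PySem.Dict.empty]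
  rfl

-- adding elements none of which equals a to a set headed by a keeps a at the head
theorem pvSetAddConsOut {α : Type} [BEq α] [LawfulBEq α] :
    ∀ (l : List α) (a : α) (s : List α), a ∉ l →
      List.foldl PySem.Set.add (a :: s) l = a :: List.foldl PySem.Set.add s l := by
  intro l
  induction l with
  | nil => intro a s _; rfl
  | cons y l ih =>
    intro a s h
    have hya : ¬ y = a := by intro e; exact h (e ▸ List.mem_cons_self ..)
    have hmem : a ∉ l := fun hm => h (List.mem_cons_of_mem _ hm)
    simp only [List.foldl_cons]
    by_cases hc : y ∈ s
    · rw [show PySem.Set.add (a :: s) y = a :: s by simp [PySem.Set.add, hya, hc],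
         show PySem.Set.add s y = s by simp [PySem.Set.add, hc]]
      exact ih a s hmem
    · rw [show PySem.Set.add (a :: s) y = a :: (s ++ [y]) by simp [PySem.Set.add, hya, hc],
         show PySem.Set.add s y = s ++ [y] by simp [PySem.Set.add, hc]]
      exact ih a (s ++ [y]) hmem

-- adding only already-present elements leaves a set unchanged
theorem pvSetFoldMem {α : Type} [BEq α] [LawfulBEq α] :
    ∀ (l : List α) (s : List α), (∀ y ∈ l, y ∈ s) → List.foldl PySem.Set.add s l = s := by
  intro l
  induction l with
  | nil => intro s _; rfl
  | cons y l ih =>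
    intro s h
    simp only [List.foldl_cons]
    rw [PySem.Set.add_of_mem (h y (List.mem_cons_self ..))]
    exact ih s (fun z hz => h z (List.mem_cons_of_mem _ hz))

-- dedup of a run-structured list: the leading run collapses to its head
theorem pvOfList_run {α : Type} [BEq α] [LawfulBEq α] (a : α) (l1 l2 : List α)
    (h1 : ∀ y ∈ l1, y = a) (h2 : a ∉ l2) :
    PySem.Set.ofList (a :: (l1 ++ l2)) = a :: PySem.Set.ofList l2 := by
  have h0 : PySem.Set.add PySem.Set.empty a = [a] := by
    simp [PySem.Set.add, PySem.Set.empty]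
  show List.foldl PySem.Set.add PySem.Set.empty (a :: (l1 ++ l2)) = _
  rw [List.foldl_cons, h0, List.foldl_append]
  rw [pvSetFoldMem l1 [a] (by intro y hy; simp [h1 y hy])]
  rw [show ([a] : List α) = a :: [] from rfl, pvSetAddConsOut l2 a [] h2]
  rfl

-- the head of a dropWhile suffix fails the predicate
theorem pvDropWhileHead {α : Type} (p : α → Bool) :
    ∀ (l : List α) (r : α) (rs : List α), l.dropWhile p = r :: rs → p r = false := by
  intro l
  induction l with
  | nil => intro r rs h; simp [List.dropWhile] at h
  | cons y l ihl =>
    intro r rs h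
    rw [List.dropWhile_cons] at h
    split at h
    · exact ihl _ _ h
    · cases h
      simp_all

-- the main glue: iterating the dedup'd keys with filter-groups = B's run sweep, on a key-sorted list
theorem pvMainAux : ∀ (n : Nat) (L : List (Int × Int × String)), L.length ≤ n →
    L.Pairwise (fun a b => a.2.2 ≤ b.2.2) →
    ∀ acc, (PySem.Set.ofList (L.map (fun x => x.2.2))).foldl
        (fun acc k => acc ++ pvComb2 ((L.filter (fun x => x.2.2 == k)).map (fun p => (p.1, p.2.1)))) acc
      = pvRunsLoop L acc := by
  intro n
  induction n with
  | zero =>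
    intro L h hp acc
    have hnil : L = [] := List.eq_nil_of_length_eq_zero (by omega)
    subst hnil
    simp [pvRunsLoop]
  | succ n ih =>
    intro L h hp acc
    rcases L with _ | ⟨x, xs⟩
    · simp [pvRunsLoop]
    · rcases hp with _ | ⟨hx, hxs⟩
      have hsplit : xs.takeWhile (fun y => y.2.2 == x.2.2) ++ xs.dropWhile (fun y => y.2.2 == x.2.2) = xs :=
        List.takeWhile_append_dropWhile
      have htk : ∀ y ∈ xs.takeWhile (fun y => y.2.2 == x.2.2), y.2.2 = x.2.2 := by
        intro y hy
        have := List.mem_takeWhile_imp hy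
        simpa using this
      have hrest : ∀ y ∈ xs.dropWhile (fun y => y.2.2 == x.2.2), x.2.2 < y.2.2 := by
        intro y hy
        rcases hr : xs.dropWhile (fun y => y.2.2 == x.2.2) with _ | ⟨r, rs⟩
        · rw [hr] at hy; simp at hy
        · have hpr : r.2.2 ≠ x.2.2 := by
            have := pvDropWhileHead (fun y => y.2.2 == x.2.2) xs r rs hr
            simpa using this
          have hrxs : r ∈ xs := (List.dropWhile_sublist _).mem (by rw [hr]; exact List.mem_cons_self ..)
          have hxr : x.2.2 < r.2.2 := lt_of_le_of_ne (hx r hrxs) (Ne.symm hpr)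
          have hpw : (r :: rs).Pairwise (fun a b => a.2.2 ≤ b.2.2) :=
            hr ▸ hxs.sublist (List.dropWhile_sublist _)
          rw [hr] at hy
          rcases List.mem_cons.mp hy with he | hm
          · exact he ▸ hxr
          · exact lt_of_lt_of_le hxr ((List.rel_of_pairwise_cons hpw) hm)
      have hkeys : PySem.Set.ofList ((x :: xs).map (fun y => y.2.2))
          = x.2.2 :: PySem.Set.ofList ((xs.dropWhile (fun y => y.2.2 == x.2.2)).map (fun y => y.2.2)) := by
        have hm : (x :: xs).map (fun y => y.2.2)
            = x.2.2 :: ((xs.takeWhile (fun y => y.2.2 == x.2.2)).map (fun y => y.2.2)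
                ++ (xs.dropWhile (fun y => y.2.2 == x.2.2)).map (fun y => y.2.2)) := by
          rw [← List.map_append, hsplit, List.map_cons]
        rw [hm]
        refine pvOfList_run _ _ _ ?_ ?_
        · intro y hy
          rcases List.mem_map.mp hy with ⟨z, hz, he⟩
          exact he ▸ htk z hz
        · intro hy
          rcases List.mem_map.mp hy with ⟨z, hz, he⟩
          exact absurd (he ▸ hrest z hz) (lt_irrefl _)
      have hfilter_self : (x :: xs).filter (fun y => y.2.2 == x.2.2)
          = x :: xs.takeWhile (fun y => y.2.2 == x.2.2) := by
        rw [List.filter_cons, if_pos (by simp)]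
        congr 1
        conv_lhs => rw [← hsplit]
        rw [List.filter_append]
        rw [List.filter_eq_self.mpr (fun y hy => by simp [htk y hy])]
        rw [List.filter_eq_nil_iff.mpr (fun y hy => by simp; exact Ne.symm (ne_of_lt (hrest y hy)))]
        simp
      have hfilter_rest : ∀ k ∈ PySem.Set.ofList ((xs.dropWhile (fun y => y.2.2 == x.2.2)).map (fun y => y.2.2)),
          (x :: xs).filter (fun y => y.2.2 == k)
            = (xs.dropWhile (fun y => y.2.2 == x.2.2)).filter (fun y => y.2.2 == k) := by
        intro k hk
        have hk' : x.2.2 < k := by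
          rcases List.mem_map.mp ((PySem.Set.mem_ofList _ _).mp hk) with ⟨z, hz, he⟩
          exact he ▸ hrest z hz
        rw [List.filter_cons, if_neg (by simp; exact ne_of_lt hk')]
        conv_lhs => rw [← hsplit]
        rw [List.filter_append]
        rw [List.filter_eq_nil_iff.mpr (fun y hy => by
          simp
          rw [htk y hy]
          exact ne_of_lt hk')]
        simp
      rw [hkeys]
      simp only [List.foldl_cons]
      rw [hfilter_self]
      rw [PySem.List.foldl_congr_mem _ _
        (fun acc k => acc ++ pvComb2
          (((xs.dropWhile (fun y => y.2.2 == x.2.2)).filter (fun y => y.2.2 == k)).map (fun q => (q.1, q.2.1)))) _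
        (by intro a k hk; rw [hfilter_rest k hk])]
      rw [ih (xs.dropWhile (fun y => y.2.2 == x.2.2))
        (le_trans (List.length_dropWhile_le _ xs) (by simpa using Nat.lt_succ_iff.mp (by simpa using h)))
        (hxs.sublist (List.dropWhile_sublist _)) _]
      conv_rhs => rw [pvRunsLoop]
      rw [pvCombLoop_eq]

-- A's whole computation, re-expressed over the dedup'd keys and filter-groups of the sorted input
theorem pvA_eq (nodes : List (Int × Int × String)) (grid : List (List String)) :
    match_nodes nodes grid
      = (PySem.Set.ofList ((PySem.List.sorted nodes (fun x => x.2.2) false).map (fun x => x.2.2))).foldl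
          (fun acc k => acc ++ pvComb2
            (((PySem.List.sorted nodes (fun x => x.2.2) false).filter (fun x => x.2.2 == k)).map
              (fun p => (p.1, p.2.1)))) [] := by
  simp only [match_nodes]
  rw [pvBuild_keys]
  refine PySem.List.foldl_congr_mem _ _ _ _ ?_
  intro a k _
  rw [pvBuild_getD _ _ k, show (PySem.Dict.empty : PySem.Dict String (List (Int × Int))).getD k [] = [] from rfl,
    List.nil_append]
  exact pvBodyA_eq _ a

-- ===== VERDICT (by name: the statement is the Claim_ definition above) =====
theorem match_nodes_spec : Claim_equal_match_nodes := by
  intro nodes grid _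
  unfold Spec_match_nodes match_nodes_alt
  rw [pvA_eq nodes grid]
  exact pvMainAux (PySem.List.sorted nodes (fun x => x.2.2) false).length _ le_rfl
    (PySem.List.sorted_pairwise nodes (fun x => x.2.2)) []
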